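-- pv_equiv track=rewrite | github.com/ravenholm462/csttool | scripts/compare_outputs.py | _category_verdict
-- ===== SOURCE A (Python) =====
-- BITWISE_IDENTICAL = "BITWISE_IDENTICAL"
--
-- TOLERANCE_IDENTICAL = "TOLERANCE_IDENTICAL"
--
-- NON_DETERMINISTIC = "NON_DETERMINISTIC"
--
-- def _category_verdict(file_results: dict) -> str:
--     """Determine verdict for a category from its per-file results."""
--     statuses = [r["status"] for r in file_results.values() if r["status"] != "SKIPPED"]
--     if not statuses:
--         return "SKIPPED"
--     if any(s == NON_DETERMINISTIC for s in statuses):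
--         return NON_DETERMINISTIC
--     if all(s == BITWISE_IDENTICAL for s in statuses):
--         return BITWISE_IDENTICAL
--     return TOLERANCE_IDENTICAL
-- ===== SOURCE B (Python) =====
-- BITWISE_IDENTICAL = "BITWISE_IDENTICAL"
--
-- TOLERANCE_IDENTICAL = "TOLERANCE_IDENTICAL"
--
-- NON_DETERMINISTIC = "NON_DETERMINISTIC"
--
-- _SEVERITY = {BITWISE_IDENTICAL: 0, NON_DETERMINISTIC: 2}
--
-- _VERDICTS = (BITWISE_IDENTICAL, TOLERANCE_IDENTICAL, NON_DETERMINISTIC)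
--
-- def _category_verdict(file_results: dict) -> str:
--     """Verdict = join in the severity lattice BITWISE < TOLERANCE < NON_DETERMINISTIC."""
--     worst = max((_SEVERITY.get(r["status"], 1)
--                  for r in file_results.values() if r["status"] != "SKIPPED"),
--                 default=-1)
--     return "SKIPPED" if worst < 0 else _VERDICTS[worst]
-- ===== Notes on version B (the rewrite author's own statement) =====
-- stated objective: alternative
-- what changed: Replaces the filtered list plus any/all cascade by a max-reduction over a severity lattice (BITWISE=0 < other=1 < NON_DETERMINISTIC=2) decoded through a verdict table.
import Mathlib
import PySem

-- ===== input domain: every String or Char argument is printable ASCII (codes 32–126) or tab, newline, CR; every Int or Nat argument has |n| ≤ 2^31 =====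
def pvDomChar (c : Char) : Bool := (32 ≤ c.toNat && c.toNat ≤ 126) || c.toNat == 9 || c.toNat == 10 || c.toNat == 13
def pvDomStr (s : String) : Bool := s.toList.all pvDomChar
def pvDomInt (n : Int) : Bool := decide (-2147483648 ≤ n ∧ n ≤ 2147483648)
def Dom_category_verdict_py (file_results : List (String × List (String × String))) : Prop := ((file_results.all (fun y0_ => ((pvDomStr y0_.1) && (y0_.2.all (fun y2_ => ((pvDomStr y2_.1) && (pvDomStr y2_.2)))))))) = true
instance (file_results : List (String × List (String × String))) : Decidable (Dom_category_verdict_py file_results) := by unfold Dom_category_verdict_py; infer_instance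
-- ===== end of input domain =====

-- B replaces A's filtered list plus any/all cascade by a max-reduction over a
-- severity lattice (BITWISE=0 < other=1 < NON_DETERMINISTIC=2) decoded via a table.

-- ===== PORT A =====
-- r["status"] (KeyError when absent; Pre_ excludes that)
def pvStatus (r : List (String × String)) : String :=
  ((PySem.Dict.mk r).get? "status").getD ""

-- [r["status"] for r in file_results.values() if r["status"] != "SKIPPED"]
def pvStatuses (file_results : List (String × List (String × String))) : List String :=
  (file_results.map (fun kv => pvStatus kv.2)).filter (fun s => s != "SKIPPED")

def category_verdict_py (file_results : List (String × List (String × String))) : String :=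
  let statuses := pvStatuses file_results
  if statuses.isEmpty then "SKIPPED"
  else if statuses.any (fun s => s == "NON_DETERMINISTIC") then "NON_DETERMINISTIC"
  else if statuses.all (fun s => s == "BITWISE_IDENTICAL") then "BITWISE_IDENTICAL"
  else "TOLERANCE_IDENTICAL"

-- ===== PORT B =====
-- _SEVERITY.get(s, 1)
def pvSev (s : String) : Int :=
  (PySem.Dict.mk [("BITWISE_IDENTICAL", (0 : Int)), ("NON_DETERMINISTIC", 2)]).getD s 1

-- max(generator, default=-1): fold max over the non-SKIPPED severities, seeded with -1
def pvWorst (file_results : List (String × List (String × String))) : Int :=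
  file_results.foldl
    (fun acc kv =>
      let s := pvStatus kv.2
      if s == "SKIPPED" then acc else max acc (pvSev s))
    (-1)

def category_verdict_py_alt (file_results : List (String × List (String × String))) : String :=
  let worst := pvWorst file_results
  if worst < 0 then "SKIPPED"
  else (PySem.List.pyGet? ["BITWISE_IDENTICAL", "TOLERANCE_IDENTICAL", "NON_DETERMINISTIC"] worst).getD ""

-- ===== PRECONDITION & SPEC =====
-- Pre_ excludes inputs where some per-file result has no "status" key: Python A (and B) raise KeyError there.
def Pre_category_verdict_py (file_results : List (String × List (String × String))) : Prop :=
  ∀ kv ∈ file_results, ((PySem.Dict.mk kv.2).get? "status").isSome = true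
instance (file_results : List (String × List (String × String))) : Decidable (Pre_category_verdict_py file_results) := by unfold Pre_category_verdict_py; infer_instance

def pvWitness_category_verdict_py : (List (String × List (String × String))) :=
  [("f1", [("status", "BITWISE_IDENTICAL")]), ("f2", [("status", "SKIPPED")])]

def Spec_category_verdict_py (file_results : List (String × List (String × String))) (out : String) : Prop := out = category_verdict_py_alt file_results
instance (file_results : List (String × List (String × String))) (out : String) : Decidable (Spec_category_verdict_py file_results out) := by unfold Spec_category_verdict_py; infer_instance

-- ===== CLAIM (what is proved, stated in full; the proofs are below) =====
def Claim_equal_category_verdict_py : Prop := ∀ (file_results : List (String × List (String × String))), Dom_category_verdict_py file_results → Pre_category_verdict_py file_results → Spec_category_verdict_py file_results (category_verdict_py file_results)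

-- ===== LEMMAS AND PROOFS =====

-- B's fold skips exactly what A's comprehension filters out
theorem pvWorst_eq_fold (l : List (String × List (String × String))) (a : Int) :
    l.foldl (fun acc kv =>
      let s := pvStatus kv.2
      if s == "SKIPPED" then acc else max acc (pvSev s)) a
    = (pvStatuses l).foldl (fun acc s => max acc (pvSev s)) a := by
  induction l generalizing a with
  | nil => simp [pvStatuses]
  | cons kv tl ih =>
    simp only [List.foldl_cons, pvStatuses, List.map_cons, List.filter_cons] at *
    by_cases h : pvStatus kv.2 = "SKIPPED"
    · simpa [h] using ih a
    · simpa [h] using ih (max a (pvSev (pvStatus kv.2)))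

-- severity table lookups
theorem pvSev_nd : pvSev "NON_DETERMINISTIC" = 2 := by decide
theorem pvSev_bw : pvSev "BITWISE_IDENTICAL" = 0 := by decide
theorem pvSev_other (s : String) (hn : s ≠ "NON_DETERMINISTIC") (hb : s ≠ "BITWISE_IDENTICAL") :
    pvSev s = 1 := by
  have h1 : ("BITWISE_IDENTICAL" == s) = false := beq_eq_false_iff_ne.mpr (Ne.symm hb)
  have h2 : ("NON_DETERMINISTIC" == s) = false := beq_eq_false_iff_ne.mpr (Ne.symm hn)
  simp [pvSev, PySem.Dict.getD, PySem.Dict.get?, List.find?, h1, h2]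
theorem pvFoldMax_char (S : List String) (a : Int) :
    S.foldl (fun acc s => max acc (pvSev s)) a =
      if S.any (fun s => s == "NON_DETERMINISTIC") then max a 2
      else if S.isEmpty then a
      else if S.all (fun s => s == "BITWISE_IDENTICAL") then max a 0
      else max a 1 := by
  induction S generalizing a with
  | nil => simp
  | cons s tl ih =>
    simp only [List.foldl_cons, List.any_cons, List.all_cons, List.isEmpty_cons, ih]
    by_cases hn : s = "NON_DETERMINISTIC"
    · subst hn
      rw [pvSev_nd]
      by_cases h2 : tl.any (fun x => x == "NON_DETERMINISTIC") = true <;>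
        by_cases h3 : tl.isEmpty = true <;>
        by_cases h4 : tl.all (fun x => x == "BITWISE_IDENTICAL") = true <;>
        simp [h2, h3, h4, max_assoc] <;> omega
    · by_cases hb : s = "BITWISE_IDENTICAL"
      · subst hb
        rw [pvSev_bw]
        by_cases h2 : tl.any (fun x => x == "NON_DETERMINISTIC") = true <;>
          by_cases h3 : tl.isEmpty = true <;>
          by_cases h4 : tl.all (fun x => x == "BITWISE_IDENTICAL") = true <;>
          simp [h2, h3, h4, max_assoc] <;> first | omega | exact absurd (by simp [List.isEmpty_iff.mp h3]) h4
      · rw [pvSev_other s hn hb]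
        by_cases h2 : tl.any (fun x => x == "NON_DETERMINISTIC") = true <;>
          by_cases h3 : tl.isEmpty = true <;>
          by_cases h4 : tl.all (fun x => x == "BITWISE_IDENTICAL") = true <;>
          simp [hn, hb, h2, h3, h4, max_assoc] <;> omega

theorem category_verdict_py_eq (l : List (String × List (String × String))) :
    category_verdict_py l = category_verdict_py_alt l := by
  unfold category_verdict_py category_verdict_py_alt pvWorst
  rw [pvWorst_eq_fold, pvFoldMax_char]
  by_cases h2 : (pvStatuses l).any (fun s => s == "NON_DETERMINISTIC") = true <;>
    by_cases h3 : (pvStatuses l).isEmpty = true <;>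
    by_cases h4 : (pvStatuses l).all (fun s => s == "BITWISE_IDENTICAL") = true <;>
    simp [h2, h3, h4] <;> first
      | rfl
      | (exfalso; revert h2 h4; cases hs : pvStatuses l <;> simp_all)

-- ===== VERDICT (by name: the statement is the Claim_ definition above) =====
theorem category_verdict_py_spec : Claim_equal_category_verdict_py := by
  intro l _ _
  unfold Spec_category_verdict_py
  exact category_verdict_py_eq l
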